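-- pv_equiv track=rewrite | github.com/KarolKwarciak/pp1 | 04-Subroutines/40.py | sum_repeated_digits
-- ===== SOURCE A (Python) =====
-- def sum_repeated_digits(number):
--     digit_counts = {}
--     total_sum = 0
--
--     for digit in str(number):
--         if digit in digit_counts:
--             digit_counts[digit] += 1
--         else:
--             digit_counts[digit] = 1
--
--     for digit, count in digit_counts.items():
--         if count > 1:
--             total_sum += int(digit) * count
--
--     return total_sum
-- ===== SOURCE B (Python) =====
-- def sum_repeated_digits(number):
--     s = sorted(str(number))
--     total = 0
--     i = 0
--     n = len(s)
--     while i < n: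
--         j = i
--         while j < n and s[j] == s[i]:
--             j += 1
--         if j - i > 1:
--             total += int(s[i]) * (j - i)
--         i = j
--     return total
-- ===== Notes on version B (the rewrite author's own statement) =====
-- stated objective: alternative
-- what changed: Replaces the dict-counting pass plus items() summation with a sort-then-scan that groups maximal runs of equal characters and adds digit*run_length for runs longer than 1.
import Mathlib
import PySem

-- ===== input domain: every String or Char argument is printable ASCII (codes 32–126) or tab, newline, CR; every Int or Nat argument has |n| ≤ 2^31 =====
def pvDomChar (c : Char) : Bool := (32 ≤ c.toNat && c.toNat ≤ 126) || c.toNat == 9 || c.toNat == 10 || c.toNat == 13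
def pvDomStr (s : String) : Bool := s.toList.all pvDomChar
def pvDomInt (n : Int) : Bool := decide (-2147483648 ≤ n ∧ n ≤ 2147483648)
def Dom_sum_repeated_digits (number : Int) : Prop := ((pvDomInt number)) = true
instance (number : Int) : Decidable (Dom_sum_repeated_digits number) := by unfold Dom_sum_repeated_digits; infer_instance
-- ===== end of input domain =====

-- B replaces A's dict-counting pass + items() summation with sort-then-scan over maximal runs
-- of equal characters (alternative decomposition, not claimed faster).


-- int(digit) for a one-character string. Exact wherever either program reaches it: only the
-- digit characters of str(number) can repeat (the sign '-' occurs at most once), and on a digit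
-- character ofChars? is some, so the .getD 0 default is never used.
def pyIntChar (c : Char) : Int := (PySem.Int.ofChars? [c]).getD 0

-- ===== PORT A =====
def sum_repeated_digits (number : Int) : Int :=
  -- first loop: for digit in str(number): if digit in digit_counts: += 1 else: = 1
  let digit_counts : PySem.Dict Char Int :=
    (PySem.Int.toChars number).foldl
      (fun d digit =>
        if d.contains digit then d.insert digit (d.getD digit 0 + 1)
        else d.insert digit 1)
      PySem.Dict.empty
  -- second loop: for digit, count in digit_counts.items(): if count > 1: total += int(digit)*count
  digit_counts.items.foldl
    (fun total_sum p => if p.2 > 1 then total_sum + pyIntChar p.1 * p.2 else total_sum) 0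

-- ===== PORT B =====
-- the outer while loop of Source B: each step consumes one maximal run s[i:j] of equal characters
-- (the inner while loop = takeWhile/dropWhile) and adds int(s[i])*(j-i) when j-i > 1.
def runsSumGo : List Char → Int
  | [] => 0
  | c :: rest =>
      let n : Int := (rest.takeWhile (· == c)).length + 1
      (if n > 1 then pyIntChar c * n else 0) + runsSumGo (rest.dropWhile (· == c))
termination_by l => l.length
decreasing_by
  have := List.length_dropWhile_le (· == c) rest
  simp only [List.length_cons]; omega

def sum_repeated_digits_alt (number : Int) : Int :=
  runsSumGo (PySem.List.sorted (PySem.Int.toChars number) (fun c => c) false)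

-- ===== PRECONDITION & SPEC =====
def Spec_sum_repeated_digits (number : Int) (out : Int) : Prop := out = sum_repeated_digits_alt number
instance (number : Int) (out : Int) : Decidable (Spec_sum_repeated_digits number out) := by unfold Spec_sum_repeated_digits; infer_instance

-- ===== CLAIM (what is proved, stated in full; the proofs are below) =====
def Claim_equal_sum_repeated_digits : Prop := ∀ (number : Int), Dom_sum_repeated_digits number → Spec_sum_repeated_digits number (sum_repeated_digits number)

-- ===== LEMMAS AND PROOFS =====

-- the contribution of one distinct character with multiplicity n
def pvTerm (c : Char) (n : Nat) : Int := if (n : Int) > 1 then pyIntChar c * n else 0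

-- the common value: sum of pvTerm over the distinct characters of s
def pvF (s : List Char) : Int := ∑ k ∈ s.toFinset, pvTerm k (s.count k)

theorem pvF_perm {s t : List Char} (h : s.Perm t) : pvF s = pvF t := by
  unfold pvF
  rw [List.toFinset_eq_of_perm s t h]
  exact Finset.sum_congr rfl (fun k _ => by rw [h.count_eq])

-- ---- A side ----

theorem sumA_eq (s : List Char) :
    ((s.foldl (fun d digit =>
        if d.contains digit then d.insert digit (d.getD digit 0 + 1)
        else d.insert digit 1) (PySem.Dict.empty : PySem.Dict Char Int)).items.foldl
      (fun total_sum p => if p.2 > 1 then total_sum + pyIntChar p.1 * p.2 else total_sum) 0)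
      = pvF s := by
  have hd : (s.foldl (fun d digit =>
        if d.contains digit then d.insert digit (d.getD digit 0 + 1)
        else d.insert digit 1) (PySem.Dict.empty : PySem.Dict Char Int))
      = PySem.Dict.counter s := by
    rw [← PySem.Dict.foldl_insert_getD_add_one_eq_counter]
    refine PySem.List.foldl_congr_mem _ _ _ _ ?_
    intro d c _
    by_cases hc : d.contains c = true
    · simp [hc]
    · simp only [Bool.not_eq_true] at hc
      simp [hc, PySem.Dict.getD_of_not_contains]
  rw [hd, PySem.Dict.items_counter, List.foldl_map]
  rw [PySem.List.foldl_congr_mem (PySem.Set.ofList s) _ (fun (t : Int) k => t + pvTerm k (s.count k)) 0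
        (by
          intro t k _
          simp only []
          unfold pvTerm
          split_ifs <;> simp)]
  rw [PySem.List.foldl_add]
  rw [← List.sum_toFinset _ (PySem.Set.nodup_ofList s)]
  have hfs : (PySem.Set.ofList s).toFinset = s.toFinset := by
    ext x; simp [PySem.Set.mem_ofList]
  rw [hfs, zero_add]; rfl

-- ---- B side ----

theorem head_dropWhile_false {l : List Char} {p : Char → Bool} {hd : Char} {tl : List Char}
    (h : l.dropWhile p = hd :: tl) : p hd = false := by
  induction l with
  | nil => simp at h
  | cons a t ih =>
    rw [List.dropWhile_cons] at h
    split at h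
    · exact ih h
    · next hn => cases h; simpa using hn

theorem runsSum_eq : ∀ (t : List Char), t.Pairwise (· ≤ ·) → runsSumGo t = pvF t := by
  intro t
  induction t using runsSumGo.induct with
  | case1 => intro _; simp [runsSumGo, pvF]
  | case2 c rest ih =>
    intro hpw
    obtain ⟨hle, hrest⟩ := List.pairwise_cons.mp hpw
    set run := rest.takeWhile (· == c) with hrundef
    set tail := rest.dropWhile (· == c) with htaildef
    have hsplit : run ++ tail = rest := List.takeWhile_append_dropWhile
    have hrun : ∀ x ∈ run, x = c := by
      intro x hx
      have := List.mem_takeWhile_imp hx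
      simpa using this
    have htailpw : tail.Pairwise (· ≤ ·) :=
      List.Pairwise.sublist (List.dropWhile_sublist _) hrest
    have htailgt : ∀ x ∈ tail, c < x := by
      cases htl : tail with
      | nil => simp
      | cons hd tl =>
        have hhdne : hd ≠ c := by
          simpa using head_dropWhile_false (p := fun x => x == c) (htaildef.symm.trans htl)
        have hhdmem : hd ∈ rest := by
          rw [← hsplit, htl]; simp
        have hchd : c < hd := lt_of_le_of_ne (hle hd hhdmem) (Ne.symm hhdne)
        intro x hx
        rcases List.mem_cons.mp hx with rfl | hx
        · exact hchd
        · have := (List.pairwise_cons.mp (htl ▸ htailpw)).1 x hx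
          exact lt_of_lt_of_le hchd this
    have hctail : c ∉ tail := fun hc => lt_irrefl c (htailgt c hc)
    have hcount_run : run.count c = run.length :=
      List.count_eq_length.mpr (fun b hb => (hrun b hb).symm)
    have hcount_c : (c :: rest).count c = run.length + 1 := by
      rw [← hsplit]
      simp [List.count_append, hcount_run, List.count_eq_zero.mpr hctail]
    have hcount_tail : ∀ k ∈ tail, (c :: rest).count k = tail.count k := by
      intro k hk
      have hkc : k ≠ c := fun h => lt_irrefl c (h ▸ htailgt k hk)
      have hkrun : k ∉ run := fun h => hkc (hrun k h)
      rw [← hsplit]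
      simp [List.count_append, List.count_eq_zero.mpr hkrun, Ne.symm hkc]
    have hfinset : (c :: rest).toFinset = insert c tail.toFinset := by
      ext x
      simp only [List.mem_toFinset, Finset.mem_insert, List.mem_cons, ← hsplit, List.mem_append]
      constructor
      · rintro (rfl | hx | hx)
        · exact Or.inl rfl
        · exact Or.inl (hrun x hx)
        · exact Or.inr hx
      · rintro (rfl | hx)
        · exact Or.inl rfl
        · exact Or.inr (Or.inr hx)
    rw [runsSumGo]
    rw [ih htailpw]
    unfold pvF
    rw [hfinset, Finset.sum_insert (by simpa using hctail)]
    have hterm : pvTerm c ((c :: rest).count c)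
        = (if ((run.length : Int) + 1) > 1 then pyIntChar c * ((run.length : Int) + 1) else 0) := by
      rw [hcount_c]; unfold pvTerm; push_cast; rfl
    have htailsum : ∑ k ∈ tail.toFinset, pvTerm k ((c :: rest).count k)
        = ∑ k ∈ tail.toFinset, pvTerm k (tail.count k) :=
      Finset.sum_congr rfl (fun k hk => by rw [hcount_tail k (List.mem_toFinset.mp hk)])
    rw [htailsum, hterm]

-- ===== VERDICT (by name: the statement is the Claim_ definition above) =====
theorem sum_repeated_digits_spec : Claim_equal_sum_repeated_digits := by
  intro number _
  unfold Spec_sum_repeated_digits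
  simp only [sum_repeated_digits, sum_repeated_digits_alt]
  rw [sumA_eq]
  have hpw : (PySem.List.sorted (PySem.Int.toChars number) (fun c => c) false).Pairwise (· ≤ ·) := by
    have := PySem.List.sorted_pairwise (xs := PySem.Int.toChars number) (key := fun c => c)
    simpa using this
  rw [runsSum_eq _ hpw]
  exact (pvF_perm (PySem.List.sorted_perm _ _ _)).symm
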